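-- pv_equiv track=rewrite | github.com/prashant-shetty27/ai-testcase-generator | testcase_generator.py | _normalize_objective
-- ===== SOURCE A (Python) =====
-- def _normalize_objective(scenario: str) -> str:
--     if not scenario or not str(scenario).strip():
--         return "the intended workflow"
--
--     cleaned = str(scenario).strip().rstrip(".")
--     prefixes = ["validate ", "verify ", "check ", "ensure ", "confirm ", "test "]
--
--     lower_cleaned = cleaned.lower()
--     for prefix in prefixes:
--         if lower_cleaned.startswith(prefix):
--             cleaned = cleaned[len(prefix):].strip()
--             break
--
--     return cleaned if cleaned else "the intended workflow"
-- ===== SOURCE B (Python) =====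
-- def _normalize_objective(scenario: str) -> str:
--     if not scenario or not str(scenario).strip():
--         return "the intended workflow"
--
--     cleaned = str(scenario).strip().rstrip(".")
--
--     first, sep, rest = cleaned.partition(" ")
--     if sep and first.lower() in {"validate", "verify", "check", "ensure", "confirm", "test"}:
--         cleaned = rest.strip()
--
--     return cleaned if cleaned else "the intended workflow"
-- ===== Notes on version B (the rewrite author's own statement) =====
-- stated objective: idiomatic
-- what changed: Replaces the six-way startswith loop over space-terminated prefixes with a single partition at the first space plus one set-membership test of the lowered first token, so the prefix scan disappears.
import Mathlib
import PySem

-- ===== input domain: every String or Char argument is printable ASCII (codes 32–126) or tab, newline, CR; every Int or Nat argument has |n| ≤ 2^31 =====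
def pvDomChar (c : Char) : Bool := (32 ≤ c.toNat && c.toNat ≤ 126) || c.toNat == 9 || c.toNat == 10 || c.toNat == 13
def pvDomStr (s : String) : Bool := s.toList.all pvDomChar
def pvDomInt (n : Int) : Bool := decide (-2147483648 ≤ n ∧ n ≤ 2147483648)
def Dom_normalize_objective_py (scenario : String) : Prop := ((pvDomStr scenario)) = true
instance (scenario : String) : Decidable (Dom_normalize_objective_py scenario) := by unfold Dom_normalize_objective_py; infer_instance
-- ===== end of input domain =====

-- B replaces A's six-way startswith-prefix loop by one partition at the first space
-- plus a set-membership test of the lowered first token (idiomatic; same cost).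


-- hand port of s.rstrip("."): drop trailing '.' characters (exact for this one-char strip set)
def pvRstripDot (s : String) : String :=
  String.ofList ((s.toList.reverse.dropWhile (fun c => c == '.')).reverse)

-- ===== PORT A =====
def pvPrefixesA : List String :=
  ["validate ", "verify ", "check ", "ensure ", "confirm ", "test "]

-- A's for-loop with break: first prefix the lowered string starts with is cut off and the rest stripped
def pvLoopA (cleaned lowerCleaned : String) : List String → String
  | [] => cleaned
  | p :: ps =>
    if PySem.Str.startswith lowerCleaned p then
      PySem.Str.strip (PySem.Str.slice cleaned (some (PySem.Str.len p)) none)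
    else pvLoopA cleaned lowerCleaned ps

def normalize_objective_py (scenario : String) : String :=
  if scenario = "" ∨ PySem.Str.strip scenario = "" then "the intended workflow"
  else
    let cleaned := pvRstripDot (PySem.Str.strip scenario)
    let cleaned' := pvLoopA cleaned (PySem.Str.lower cleaned) pvPrefixesA
    if cleaned' = "" then "the intended workflow" else cleaned'

-- ===== PORT B =====
-- hand port of s.partition(" "): split at the FIRST space (exact for a single-character separator)
def pvPartitionSpace (s : String) : String × String × String :=
  let cs := s.toList
  let pre := cs.takeWhile (fun c => c ≠ ' ')
  if pre.length = cs.length then (s, "", "")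
  else (String.ofList pre, " ", String.ofList (cs.drop (pre.length + 1)))

def pvWordsB : List String := ["validate", "verify", "check", "ensure", "confirm", "test"]

def normalize_objective_py_alt (scenario : String) : String :=
  if scenario = "" ∨ PySem.Str.strip scenario = "" then "the intended workflow"
  else
    let cleaned := pvRstripDot (PySem.Str.strip scenario)
    let parts := pvPartitionSpace cleaned
    let cleaned' :=
      if parts.2.1 ≠ "" ∧ PySem.Str.lower parts.1 ∈ pvWordsB then PySem.Str.strip parts.2.2
      else cleaned
    if cleaned' = "" then "the intended workflow" else cleaned'

-- ===== PRECONDITION & SPEC =====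
def Spec_normalize_objective_py (scenario : String) (out : String) : Prop := out = normalize_objective_py_alt scenario
instance (scenario : String) (out : String) : Decidable (Spec_normalize_objective_py scenario out) := by unfold Spec_normalize_objective_py; infer_instance

-- ===== CLAIM (what is proved, stated in full; the proofs are below) =====
def Claim_equal_normalize_objective_py : Prop := ∀ (scenario : String), Dom_normalize_objective_py scenario → Spec_normalize_objective_py scenario (normalize_objective_py scenario)

-- ===== LEMMAS AND PROOFS =====
theorem lowerChar_eq_space_iff (c : Char) : (PySem.Chars.lowerChar c = ' ') ↔ c = ' ' := by
  unfold PySem.Chars.lowerChar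
  split_ifs with h
  · unfold PySem.Chars.isupper at h
    simp only [Bool.and_eq_true, decide_eq_true_eq] at h
    have h1 : 65 ≤ c.toNat ∧ c.toNat ≤ 90 := by
      obtain ⟨ha, hb⟩ := h
      rw [Char.le_def] at ha hb
      exact ⟨UInt32.le_iff_toNat_le.mp ha, UInt32.le_iff_toNat_le.mp hb⟩
    have hv : (c.toNat + 32).isValidChar := by left; omega
    have h2 : (Char.ofNat (c.toNat + 32)).toNat = c.toNat + 32 := by
      simp [Char.ofNat, hv, Char.ofNatAux, Char.toNat_mk]; omega
    constructor
    · intro he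
      have : (Char.ofNat (c.toNat + 32)).toNat = 32 := by rw [he]; rfl
      omega
    · intro he; subst he; simp at h1
  · simp

theorem takeWhile_token (u t : List Char) (h : ∀ x ∈ u, x ≠ ' ') :
    (u ++ ' ' :: t).takeWhile (fun c => c ≠ ' ') = u := by
  induction u with
  | nil => simp
  | cons a u ih =>
    have ha : a ≠ ' ' := h a (by simp)
    have ih' := ih (fun x hx => h x (List.mem_cons_of_mem _ hx))
    simp only [ne_eq, decide_not] at ih'
    simp [ha, ih']

theorem startswith_word_space (cs w : List Char) (hw : ' ' ∉ w) :
    ((w ++ [' ']) <+: PySem.Chars.lower cs) ↔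
      ((cs.takeWhile (fun c => c ≠ ' ')).length < cs.length ∧
        PySem.Chars.lower (cs.takeWhile (fun c => c ≠ ' ')) = w) := by
  have hlower : ∀ l : List Char, PySem.Chars.lower l = l.map PySem.Chars.lowerChar := fun _ => rfl
  constructor
  · rintro ⟨t, ht⟩
    rw [hlower, List.append_assoc] at ht
    have ht' : cs.map PySem.Chars.lowerChar = w ++ (' ' :: t) := by simpa using ht.symm
    obtain ⟨u, v, hcs, hu, hv⟩ := List.map_eq_append_iff.mp ht'
    cases v with
    | nil => simp at hv
    | cons c t' =>
      simp only [List.map_cons, List.cons.injEq] at hv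
      have hc : c = ' ' := (lowerChar_eq_space_iff c).mp hv.1
      subst hc
      subst hcs
      have hall : ∀ x ∈ u, x ≠ ' ' := by
        intro x hx hx'
        subst hx'
        have : PySem.Chars.lowerChar ' ' ∈ u.map PySem.Chars.lowerChar := List.mem_map_of_mem hx
        rw [hu] at this
        have hsp : PySem.Chars.lowerChar ' ' = ' ' := by decide
        rw [hsp] at this
        exact hw this
      rw [takeWhile_token u t' hall]
      refine ⟨by simp, by rw [hlower]; exact hu⟩
  · rintro ⟨hlen, hpre⟩
    simp only [ne_eq, decide_not] at hlen hpre
    have hsplit : cs.takeWhile (fun c => !decide (c = ' ')) ++ cs.dropWhile (fun c => !decide (c = ' ')) = cs :=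
      List.takeWhile_append_dropWhile
    have hdw : cs.dropWhile (fun c => !decide (c = ' ')) ≠ [] := by
      intro h0
      have hL := congrArg List.length hsplit
      rw [h0] at hL
      simp at hL
      omega
    obtain ⟨c, rest, hcr⟩ := List.exists_cons_of_ne_nil hdw
    have hcsp : c = ' ' := by
      have h2 := List.head_dropWhile_not (fun c => !decide (c = ' ')) hdw
      have h3 : (cs.dropWhile (fun c => !decide (c = ' '))).head hdw = c := by simp [hcr]
      rw [h3] at h2
      simpa using h2
    subst hcsp
    refine ⟨rest.map PySem.Chars.lowerChar, ?_⟩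
    have hm : (cs.takeWhile (fun c => !decide (c = ' '))).map PySem.Chars.lowerChar = w := by
      rw [← hlower]
      exact hpre
    have hsp : PySem.Chars.lowerChar ' ' = ' ' := by decide
    conv_rhs => rw [hlower, ← hsplit, hcr]
    simp [List.map_append, hm, hsp]

theorem key_lemma (s : String) :
    pvLoopA s (PySem.Str.lower s) pvPrefixesA =
      (if (pvPartitionSpace s).2.1 ≠ "" ∧ PySem.Str.lower (pvPartitionSpace s).1 ∈ pvWordsB
       then PySem.Str.strip (pvPartitionSpace s).2.2 else s) := by
  have cond : ∀ (p : String) (w : List Char), p.toList = w ++ [' '] → ' ' ∉ w →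
      (PySem.Str.startswith (PySem.Str.lower s) p =
        decide ((s.toList.takeWhile (fun c => c ≠ ' ')).length < s.toList.length ∧
          PySem.Chars.lower (s.toList.takeWhile (fun c => c ≠ ' ')) = w)) := by
    intro p w hp hw
    rw [PySem.Str.startswith_eq, PySem.Str.toList_lower, hp]
    by_cases h : (w ++ [' ']) <+: PySem.Chars.lower s.toList
    · rw [(PySem.Chars.startswith_iff _ _).mpr h]
      exact (decide_eq_true ((startswith_word_space s.toList w hw).mp h)).symm
    · have h2 : PySem.Chars.startswith (PySem.Chars.lower s.toList) (w ++ [' ']) = false := by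
        rw [Bool.eq_false_iff]
        intro hh
        exact h ((PySem.Chars.startswith_iff _ _).mp hh)
      have h3 : ¬ ((s.toList.takeWhile (fun c => c ≠ ' ')).length < s.toList.length ∧
          PySem.Chars.lower (s.toList.takeWhile (fun c => c ≠ ' ')) = w) :=
        fun hh => h ((startswith_word_space s.toList w hw).mpr hh)
      rw [h2]
      exact (decide_eq_false h3).symm
  have c1 := cond "validate " "validate".toList (by decide) (by decide)
  have c2 := cond "verify " "verify".toList (by decide) (by decide)
  have c3 := cond "check " "check".toList (by decide) (by decide)
  have c4 := cond "ensure " "ensure".toList (by decide) (by decide)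
  have c5 := cond "confirm " "confirm".toList (by decide) (by decide)
  have c6 := cond "test " "test".toList (by decide) (by decide)
  by_cases hsp : (s.toList.takeWhile (fun c => c ≠ ' ')).length < s.toList.length
  · -- a space exists: the partition yields pre / " " / rest
    have hne : ¬ ((s.toList.takeWhile (fun c => c ≠ ' ')).length = s.toList.length) := by omega
    have hparts : pvPartitionSpace s = (String.ofList (s.toList.takeWhile (fun c => c ≠ ' ')), " ",
        String.ofList (s.toList.drop ((s.toList.takeWhile (fun c => c ≠ ' ')).length + 1))) := by
      simp only [pvPartitionSpace]
      rw [if_neg hne]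
    have hlow : PySem.Str.lower (String.ofList (s.toList.takeWhile (fun c => c ≠ ' '))) =
        String.ofList (PySem.Chars.lower (s.toList.takeWhile (fun c => c ≠ ' '))) := by
      apply String.toList_inj.mp
      simp [PySem.Str.toList_lower]
    rw [hparts]
    by_cases hm1 : PySem.Chars.lower (s.toList.takeWhile (fun c => c ≠ ' ')) = "validate".toList
    · have hplen : (s.toList.takeWhile (fun c => c ≠ ' ')).length = 8 := by
        have hL := congrArg List.length hm1
        simp only [PySem.Chars.lower, List.length_map] at hL
        rw [hL]
        decide
      have hmem : String.ofList (PySem.Chars.lower (s.toList.takeWhile (fun c => c ≠ ' '))) ∈ pvWordsB := by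
        rw [hm1]
        decide
      simp only [pvPrefixesA, pvLoopA, c1, c2, c3, c4, c5, c6]
      rw [if_pos (by rw [decide_eq_true_eq]; exact ⟨hsp, hm1⟩)]
      rw [if_pos ⟨by decide, by rw [← hlow] at hmem; exact hmem⟩]
      have harg : PySem.Str.slice s (some (PySem.Str.len "validate ")) none =
          String.ofList (s.toList.drop ((s.toList.takeWhile (fun c => c ≠ ' ')).length + 1)) := by
        apply String.toList_inj.mp
        rw [PySem.Str.toList_slice]
        simp only [PySem.Chars.slice_eq_listSlice]
        rw [show PySem.Str.len "validate " = ((9 : Nat) : Int) by decide]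
        rw [PySem.List.slice_from _ (by norm_num)]
        rw [String.toList_ofList, hplen]
        norm_num
        simp
      rw [harg]
    by_cases hm2 : PySem.Chars.lower (s.toList.takeWhile (fun c => c ≠ ' ')) = "verify".toList
    · have hplen : (s.toList.takeWhile (fun c => c ≠ ' ')).length = 6 := by
        have hL := congrArg List.length hm2
        simp only [PySem.Chars.lower, List.length_map] at hL
        rw [hL]
        decide
      have hmem : String.ofList (PySem.Chars.lower (s.toList.takeWhile (fun c => c ≠ ' '))) ∈ pvWordsB := by
        rw [hm2]
        decide
      have hne1 : PySem.Chars.lower (s.toList.takeWhile (fun c => c ≠ ' ')) ≠ "validate".toList := by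
        rw [hm2]
        decide
      simp only [pvPrefixesA, pvLoopA, c1, c2, c3, c4, c5, c6]
      rw [if_neg (by rw [decide_eq_true_eq]; exact fun hh => hne1 hh.2)]
      rw [if_pos (by rw [decide_eq_true_eq]; exact ⟨hsp, hm2⟩)]
      rw [if_pos ⟨by decide, by rw [← hlow] at hmem; exact hmem⟩]
      have harg : PySem.Str.slice s (some (PySem.Str.len "verify ")) none =
          String.ofList (s.toList.drop ((s.toList.takeWhile (fun c => c ≠ ' ')).length + 1)) := by
        apply String.toList_inj.mp
        rw [PySem.Str.toList_slice]
        simp only [PySem.Chars.slice_eq_listSlice]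
        rw [show PySem.Str.len "verify " = ((7 : Nat) : Int) by decide]
        rw [PySem.List.slice_from _ (by norm_num)]
        rw [String.toList_ofList, hplen]
        norm_num
        simp
      rw [harg]
    by_cases hm3 : PySem.Chars.lower (s.toList.takeWhile (fun c => c ≠ ' ')) = "check".toList
    · have hplen : (s.toList.takeWhile (fun c => c ≠ ' ')).length = 5 := by
        have hL := congrArg List.length hm3
        simp only [PySem.Chars.lower, List.length_map] at hL
        rw [hL]
        decide
      have hmem : String.ofList (PySem.Chars.lower (s.toList.takeWhile (fun c => c ≠ ' '))) ∈ pvWordsB := by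
        rw [hm3]
        decide
      have hne1 : PySem.Chars.lower (s.toList.takeWhile (fun c => c ≠ ' ')) ≠ "validate".toList := by
        rw [hm3]
        decide
      have hne2 : PySem.Chars.lower (s.toList.takeWhile (fun c => c ≠ ' ')) ≠ "verify".toList := by
        rw [hm3]
        decide
      simp only [pvPrefixesA, pvLoopA, c1, c2, c3, c4, c5, c6]
      rw [if_neg (by rw [decide_eq_true_eq]; exact fun hh => hne1 hh.2)]
      rw [if_neg (by rw [decide_eq_true_eq]; exact fun hh => hne2 hh.2)]
      rw [if_pos (by rw [decide_eq_true_eq]; exact ⟨hsp, hm3⟩)]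
      rw [if_pos ⟨by decide, by rw [← hlow] at hmem; exact hmem⟩]
      have harg : PySem.Str.slice s (some (PySem.Str.len "check ")) none =
          String.ofList (s.toList.drop ((s.toList.takeWhile (fun c => c ≠ ' ')).length + 1)) := by
        apply String.toList_inj.mp
        rw [PySem.Str.toList_slice]
        simp only [PySem.Chars.slice_eq_listSlice]
        rw [show PySem.Str.len "check " = ((6 : Nat) : Int) by decide]
        rw [PySem.List.slice_from _ (by norm_num)]
        rw [String.toList_ofList, hplen]
        norm_num
        simp
      rw [harg]
    by_cases hm4 : PySem.Chars.lower (s.toList.takeWhile (fun c => c ≠ ' ')) = "ensure".toList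
    · have hplen : (s.toList.takeWhile (fun c => c ≠ ' ')).length = 6 := by
        have hL := congrArg List.length hm4
        simp only [PySem.Chars.lower, List.length_map] at hL
        rw [hL]
        decide
      have hmem : String.ofList (PySem.Chars.lower (s.toList.takeWhile (fun c => c ≠ ' '))) ∈ pvWordsB := by
        rw [hm4]
        decide
      have hne1 : PySem.Chars.lower (s.toList.takeWhile (fun c => c ≠ ' ')) ≠ "validate".toList := by
        rw [hm4]
        decide
      have hne2 : PySem.Chars.lower (s.toList.takeWhile (fun c => c ≠ ' ')) ≠ "verify".toList := by
        rw [hm4]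
        decide
      have hne3 : PySem.Chars.lower (s.toList.takeWhile (fun c => c ≠ ' ')) ≠ "check".toList := by
        rw [hm4]
        decide
      simp only [pvPrefixesA, pvLoopA, c1, c2, c3, c4, c5, c6]
      rw [if_neg (by rw [decide_eq_true_eq]; exact fun hh => hne1 hh.2)]
      rw [if_neg (by rw [decide_eq_true_eq]; exact fun hh => hne2 hh.2)]
      rw [if_neg (by rw [decide_eq_true_eq]; exact fun hh => hne3 hh.2)]
      rw [if_pos (by rw [decide_eq_true_eq]; exact ⟨hsp, hm4⟩)]
      rw [if_pos ⟨by decide, by rw [← hlow] at hmem; exact hmem⟩]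
      have harg : PySem.Str.slice s (some (PySem.Str.len "ensure ")) none =
          String.ofList (s.toList.drop ((s.toList.takeWhile (fun c => c ≠ ' ')).length + 1)) := by
        apply String.toList_inj.mp
        rw [PySem.Str.toList_slice]
        simp only [PySem.Chars.slice_eq_listSlice]
        rw [show PySem.Str.len "ensure " = ((7 : Nat) : Int) by decide]
        rw [PySem.List.slice_from _ (by norm_num)]
        rw [String.toList_ofList, hplen]
        norm_num
        simp
      rw [harg]
    by_cases hm5 : PySem.Chars.lower (s.toList.takeWhile (fun c => c ≠ ' ')) = "confirm".toList
    · have hplen : (s.toList.takeWhile (fun c => c ≠ ' ')).length = 7 := by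
        have hL := congrArg List.length hm5
        simp only [PySem.Chars.lower, List.length_map] at hL
        rw [hL]
        decide
      have hmem : String.ofList (PySem.Chars.lower (s.toList.takeWhile (fun c => c ≠ ' '))) ∈ pvWordsB := by
        rw [hm5]
        decide
      have hne1 : PySem.Chars.lower (s.toList.takeWhile (fun c => c ≠ ' ')) ≠ "validate".toList := by
        rw [hm5]
        decide
      have hne2 : PySem.Chars.lower (s.toList.takeWhile (fun c => c ≠ ' ')) ≠ "verify".toList := by
        rw [hm5]
        decide
      have hne3 : PySem.Chars.lower (s.toList.takeWhile (fun c => c ≠ ' ')) ≠ "check".toList := by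
        rw [hm5]
        decide
      have hne4 : PySem.Chars.lower (s.toList.takeWhile (fun c => c ≠ ' ')) ≠ "ensure".toList := by
        rw [hm5]
        decide
      simp only [pvPrefixesA, pvLoopA, c1, c2, c3, c4, c5, c6]
      rw [if_neg (by rw [decide_eq_true_eq]; exact fun hh => hne1 hh.2)]
      rw [if_neg (by rw [decide_eq_true_eq]; exact fun hh => hne2 hh.2)]
      rw [if_neg (by rw [decide_eq_true_eq]; exact fun hh => hne3 hh.2)]
      rw [if_neg (by rw [decide_eq_true_eq]; exact fun hh => hne4 hh.2)]
      rw [if_pos (by rw [decide_eq_true_eq]; exact ⟨hsp, hm5⟩)]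
      rw [if_pos ⟨by decide, by rw [← hlow] at hmem; exact hmem⟩]
      have harg : PySem.Str.slice s (some (PySem.Str.len "confirm ")) none =
          String.ofList (s.toList.drop ((s.toList.takeWhile (fun c => c ≠ ' ')).length + 1)) := by
        apply String.toList_inj.mp
        rw [PySem.Str.toList_slice]
        simp only [PySem.Chars.slice_eq_listSlice]
        rw [show PySem.Str.len "confirm " = ((8 : Nat) : Int) by decide]
        rw [PySem.List.slice_from _ (by norm_num)]
        rw [String.toList_ofList, hplen]
        norm_num
        simp
      rw [harg]
    by_cases hm6 : PySem.Chars.lower (s.toList.takeWhile (fun c => c ≠ ' ')) = "test".toList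
    · have hplen : (s.toList.takeWhile (fun c => c ≠ ' ')).length = 4 := by
        have hL := congrArg List.length hm6
        simp only [PySem.Chars.lower, List.length_map] at hL
        rw [hL]
        decide
      have hmem : String.ofList (PySem.Chars.lower (s.toList.takeWhile (fun c => c ≠ ' '))) ∈ pvWordsB := by
        rw [hm6]
        decide
      have hne1 : PySem.Chars.lower (s.toList.takeWhile (fun c => c ≠ ' ')) ≠ "validate".toList := by
        rw [hm6]
        decide
      have hne2 : PySem.Chars.lower (s.toList.takeWhile (fun c => c ≠ ' ')) ≠ "verify".toList := by
        rw [hm6]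
        decide
      have hne3 : PySem.Chars.lower (s.toList.takeWhile (fun c => c ≠ ' ')) ≠ "check".toList := by
        rw [hm6]
        decide
      have hne4 : PySem.Chars.lower (s.toList.takeWhile (fun c => c ≠ ' ')) ≠ "ensure".toList := by
        rw [hm6]
        decide
      have hne5 : PySem.Chars.lower (s.toList.takeWhile (fun c => c ≠ ' ')) ≠ "confirm".toList := by
        rw [hm6]
        decide
      simp only [pvPrefixesA, pvLoopA, c1, c2, c3, c4, c5, c6]
      rw [if_neg (by rw [decide_eq_true_eq]; exact fun hh => hne1 hh.2)]
      rw [if_neg (by rw [decide_eq_true_eq]; exact fun hh => hne2 hh.2)]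
      rw [if_neg (by rw [decide_eq_true_eq]; exact fun hh => hne3 hh.2)]
      rw [if_neg (by rw [decide_eq_true_eq]; exact fun hh => hne4 hh.2)]
      rw [if_neg (by rw [decide_eq_true_eq]; exact fun hh => hne5 hh.2)]
      rw [if_pos (by rw [decide_eq_true_eq]; exact ⟨hsp, hm6⟩)]
      rw [if_pos ⟨by decide, by rw [← hlow] at hmem; exact hmem⟩]
      have harg : PySem.Str.slice s (some (PySem.Str.len "test ")) none =
          String.ofList (s.toList.drop ((s.toList.takeWhile (fun c => c ≠ ' ')).length + 1)) := by
        apply String.toList_inj.mp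
        rw [PySem.Str.toList_slice]
        simp only [PySem.Chars.slice_eq_listSlice]
        rw [show PySem.Str.len "test " = ((5 : Nat) : Int) by decide]
        rw [PySem.List.slice_from _ (by norm_num)]
        rw [String.toList_ofList, hplen]
        norm_num
        simp
      rw [harg]
    · have hmem : ¬ (String.ofList (PySem.Chars.lower (s.toList.takeWhile (fun c => c ≠ ' '))) ∈ pvWordsB) := by
        intro hh
        simp only [pvWordsB, List.mem_cons, List.not_mem_nil, or_false] at hh
        rcases hh with h|h|h|h|h|h
        · apply hm1
          have h2 := congrArg String.toList h
          rwa [String.toList_ofList] at h2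
        · apply hm2
          have h2 := congrArg String.toList h
          rwa [String.toList_ofList] at h2
        · apply hm3
          have h2 := congrArg String.toList h
          rwa [String.toList_ofList] at h2
        · apply hm4
          have h2 := congrArg String.toList h
          rwa [String.toList_ofList] at h2
        · apply hm5
          have h2 := congrArg String.toList h
          rwa [String.toList_ofList] at h2
        · apply hm6
          have h2 := congrArg String.toList h
          rwa [String.toList_ofList] at h2
      simp only [pvPrefixesA, pvLoopA, c1, c2, c3, c4, c5, c6]
      rw [if_neg (by rw [decide_eq_true_eq]; exact fun hh => hm1 hh.2)]
      rw [if_neg (by rw [decide_eq_true_eq]; exact fun hh => hm2 hh.2)]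
      rw [if_neg (by rw [decide_eq_true_eq]; exact fun hh => hm3 hh.2)]
      rw [if_neg (by rw [decide_eq_true_eq]; exact fun hh => hm4 hh.2)]
      rw [if_neg (by rw [decide_eq_true_eq]; exact fun hh => hm5 hh.2)]
      rw [if_neg (by rw [decide_eq_true_eq]; exact fun hh => hm6 hh.2)]
      rw [if_neg (fun hc => hmem (by rw [← hlow]; exact hc.2))]
  · -- no space: no prefix matches and the partition keeps the string whole
    have hparts : pvPartitionSpace s = (s, "", "") := by
      simp only [pvPartitionSpace]
      rw [if_pos (by
        have := (List.takeWhile_sublist (l := s.toList) (fun c => decide (c ≠ ' '))).length_le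
        omega)]
    rw [hparts]
    simp only [pvPrefixesA, pvLoopA, c1, c2, c3, c4, c5, c6]
    rw [if_neg (by rw [decide_eq_true_eq]; exact fun hh => hsp hh.1)]
    rw [if_neg (by rw [decide_eq_true_eq]; exact fun hh => hsp hh.1)]
    rw [if_neg (by rw [decide_eq_true_eq]; exact fun hh => hsp hh.1)]
    rw [if_neg (by rw [decide_eq_true_eq]; exact fun hh => hsp hh.1)]
    rw [if_neg (by rw [decide_eq_true_eq]; exact fun hh => hsp hh.1)]
    rw [if_neg (by rw [decide_eq_true_eq]; exact fun hh => hsp hh.1)]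
    rw [if_neg (fun hc => hc.1 rfl)]

-- ===== VERDICT (by name: the statement is the Claim_ definition above) =====
theorem normalize_objective_py_spec : Claim_equal_normalize_objective_py := by
  intro scenario _
  unfold Spec_normalize_objective_py normalize_objective_py normalize_objective_py_alt
  split_ifs with h
  · rfl
  · simp only [key_lemma]
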